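-- pv_equiv track=rewrite | github.com/m-hauck6/Hauck-1100-Discovery-Project | DiscoveryProject1100.py | pmosEqCreator
-- ===== SOURCE A (Python) =====
-- def doubleNegation(expression): # just in case
--     while "~~" in expression:
--         expression = expression.replace("~~", "")
--     return expression
--
-- def pmosEqCreator(eq):
--     newList = []
--     newPmos = ""
--     for char in eq:
--         newList.append(char)
--     for i in range(len(newList)):
--         if newList[i].isalpha():
--             if i > 0:
--                 if i-1 == "~":
--                     newPmos += newList[i]
--                 else:
--                     newPmos += f"~{newList[i]}"
--
--             elif i == 0:
--                     newPmos += f"~{newList[i]}"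
--         else:
--             newPmos += newList[i]
--
--     return doubleNegation(newPmos)
-- ===== SOURCE B (Python) =====
-- def pmosEqCreator(eq):
--     out = []
--     for ch in eq:
--         if ch.isalpha():
--             if out and out[-1] == "~":
--                 out.pop()
--             else:
--                 out.append("~")
--             out.append(ch)
--         elif ch == "~":
--             if out and out[-1] == "~":
--                 out.pop()
--             else:
--                 out.append("~")
--         else:
--             out.append(ch)
--     return "".join(out)
-- ===== Notes on version B (the rewrite author's own statement) =====
-- stated objective: alternative
-- what changed: Replaces A's two-phase algorithm (an index loop building a new string with a negation sign inserted before every letter, followed by a while-loop that repeatedly rescans the whole string replacing each double negation with the empty string) by a single left-to-right pass that keeps an output stack and cancels-or-pushes a negation sign incrementally.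
import Mathlib
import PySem

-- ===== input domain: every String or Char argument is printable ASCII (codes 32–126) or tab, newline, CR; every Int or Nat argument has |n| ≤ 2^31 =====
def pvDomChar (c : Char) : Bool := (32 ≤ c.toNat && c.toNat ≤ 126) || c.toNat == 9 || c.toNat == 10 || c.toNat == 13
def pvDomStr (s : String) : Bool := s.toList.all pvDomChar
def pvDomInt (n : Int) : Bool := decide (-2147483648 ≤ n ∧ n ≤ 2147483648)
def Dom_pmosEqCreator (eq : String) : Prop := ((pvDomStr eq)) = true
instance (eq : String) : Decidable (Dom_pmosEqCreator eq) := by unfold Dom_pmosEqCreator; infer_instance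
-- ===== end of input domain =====

-- B replaces A's two phases (build a string with '~' before every letter, then repeatedly
-- collapse "~~" by global replace) with a single left-to-right pass over the input using an
-- output stack with cancel-or-push of '~' (objective: alternative; same return value).

-- ===== PORT A =====

-- Python's `i-1 == "~"` compares an int with a str: always False (modelled exactly).
def pyIntEqStr (_ : Int) (_ : String) : Bool := false

-- `while "~~" in expression: expression = expression.replace("~~","")`; each pass strictly
-- shortens the string, so fuel = current length bounds the number of iterations (pure
-- totality guard, proved sufficient in dn_eq below).
def doubleNegationGo (fuel : Nat) (expression : String) : String :=
  match fuel with
  | 0 => expression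
  | n + 1 =>
    if PySem.Str.isIn "~~" expression = true then
      doubleNegationGo n (PySem.Str.replace expression "~~" "")
    else expression

def doubleNegation (expression : String) : String :=
  doubleNegationGo expression.toList.length expression

def pmosEqCreator (eq : String) : String :=
  let newList : List Char := eq.toList.foldl (fun acc c => acc ++ [c]) []
  let newPmos : List Char :=
    (PySem.List.pyRange 0 (newList.length : Int) 1).foldl (fun s i =>
      let c := PySem.List.pyGetD newList i ' '
      if PySem.Chars.isalpha c then
        if 0 < i then
          if pyIntEqStr (i - 1) "~" then s ++ [c] else s ++ ['~', c]
        else if i = 0 then s ++ ['~', c]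
        else s
      else s ++ [c]) []
  doubleNegation (String.ofList newPmos)

-- ===== PORT B =====

-- `if out and out[-1] == "~": out.pop() else: out.append("~")`
def cancelPush (st : List Char) : List Char :=
  if st.getLast? = some '~' then st.dropLast else st ++ ['~']

def pmosEqCreator_alt (eq : String) : String :=
  String.ofList (eq.toList.foldl (fun st ch =>
    if PySem.Chars.isalpha ch then cancelPush st ++ [ch]
    else if ch = '~' then cancelPush st
    else st ++ [ch]) [])

-- ===== PRECONDITION & SPEC =====
def Spec_pmosEqCreator (eq : String) (out : String) : Prop := out = pmosEqCreator_alt eq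
instance (eq : String) (out : String) : Decidable (Spec_pmosEqCreator eq out) := by unfold Spec_pmosEqCreator; infer_instance

-- ===== CLAIM (what is proved, stated in full; the proofs are below) =====
def Claim_equal_pmosEqCreator : Prop := ∀ (eq : String), Dom_pmosEqCreator eq → Spec_pmosEqCreator eq (pmosEqCreator eq)

-- ===== LEMMAS AND PROOFS =====

-- the common normal form: each maximal run of '~' reduced mod 2
def rep : List Char → List Char
  | [] => []
  | [c] => [c]
  | c1 :: c2 :: t => if c1 = '~' ∧ c2 = '~' then rep t else c1 :: rep (c2 :: t)

def hasDD : List Char → Bool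
  | [] => false
  | [_] => false
  | c1 :: c2 :: t => (c1 = '~' && c2 = '~') || hasDD (c2 :: t)

theorem hasDD_iff_infix (l : List Char) : hasDD l = true ↔ ['~', '~'] <:+: l := by
  induction l with
  | nil => simp [hasDD]
  | cons c t ih =>
    rw [List.infix_cons_iff]
    cases t with
    | nil => simp [hasDD, List.IsPrefix]
    | cons c2 t2 =>
      simp only [hasDD, Bool.or_eq_true, decide_eq_true_eq, Bool.and_eq_true, ih]
      constructor
      · rintro (⟨h1, h2⟩ | h)
        · exact Or.inl (by simp [h1, h2, List.cons_prefix_cons])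
        · exact Or.inr h
      · rintro (h | h)
        · rcases List.cons_prefix_cons.mp h with ⟨h1, h2⟩
          rcases List.cons_prefix_cons.mp h2 with ⟨h3, _⟩
          exact Or.inl ⟨h1.symm, h3.symm⟩
        · exact Or.inr h

theorem rep_cons_ne (c : Char) (t : List Char) (h : c ≠ '~') : rep (c :: t) = c :: rep t := by
  cases t with
  | nil => simp [rep]
  | cons c2 t2 => simp [rep, h]

theorem rep_length_le (l : List Char) : (rep l).length ≤ l.length := by
  induction l using rep.induct with
  | case1 => simp [rep]
  | case2 c => simp [rep]
  | case3 c1 c2 t h ih => simp only [rep, if_pos h]; simp; omega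
  | case4 c1 c2 t h ih => simp only [rep, if_neg h]; simp; simpa using ih

theorem rep_length_lt (l : List Char) (h : hasDD l = true) : (rep l).length < l.length := by
  induction l using rep.induct with
  | case1 => simp [hasDD] at h
  | case2 c => simp [hasDD] at h
  | case3 c1 c2 t hc ih =>
    simp only [rep, if_pos hc]
    have := rep_length_le t; simp; omega
  | case4 c1 c2 t hc ih =>
    simp only [rep, if_neg hc]
    simp only [hasDD, Bool.or_eq_true, Bool.and_eq_true, decide_eq_true_eq] at h
    rcases h with ⟨h1, h2⟩ | h
    · exact absurd ⟨h1, h2⟩ hc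
    · simpa using ih h

theorem rep_id_of_not (l : List Char) (h : hasDD l = false) : rep l = l := by
  induction l using rep.induct with
  | case1 => simp [rep]
  | case2 c => simp [rep]
  | case3 c1 c2 t hc ih => simp [hasDD, hc.1, hc.2] at h
  | case4 c1 c2 t hc ih =>
    simp only [hasDD, Bool.or_eq_false_iff] at h
    simp only [rep, if_neg hc]
    rw [ih h.2]

theorem hasDD_rep (l : List Char) : hasDD (rep l) = false := by
  induction l using rep.induct with
  | case1 => simp [rep, hasDD]
  | case2 c => simp [rep, hasDD]
  | case3 c1 c2 t hc ih => simp only [rep, if_pos hc]; exact ih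
  | case4 c1 c2 t hc ih =>
    simp only [rep, if_neg hc]
    by_cases h1 : c1 = '~'
    · have h2 : c2 ≠ '~' := fun h2 => hc ⟨h1, h2⟩
      rw [rep_cons_ne c2 t h2]
      simp only [hasDD, Bool.or_eq_false_iff]
      refine ⟨by simp [h2], ?_⟩
      rw [← rep_cons_ne c2 t h2]; exact ih
    · cases hx : rep (c2 :: t) with
      | nil => simp [hasDD]
      | cons d r =>
        simp only [hasDD, Bool.or_eq_false_iff]
        refine ⟨by simp [h1], by rw [← hx]; exact ih⟩

theorem go_spec : ∀ (fuel : Nat) (l acc : List Char), l.length ≤ fuel →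
    PySem.Chars.replace.go ['~', '~'] [] fuel l acc = acc.reverse ++ rep l := by
  intro fuel
  induction fuel with
  | zero =>
    intro l acc h
    have : l = [] := List.eq_nil_of_length_eq_zero (Nat.le_zero.mp h)
    subst this
    simp [PySem.Chars.replace.go, rep]
  | succ n ih =>
    intro l acc h
    cases l with
    | nil => simp [PySem.Chars.replace.go, rep]
    | cons c t =>
      rw [PySem.Chars.replace.go]
      by_cases hp : List.isPrefixOf ['~', '~'] (c :: t) = true
      · rw [if_pos hp]
        have hpre : ['~', '~'] <+: c :: t := List.isPrefixOf_iff_prefix.mp hp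
        rcases hpre with ⟨r, hr⟩
        rw [← hr]
        have hlen : r.length ≤ n := by
          have := congrArg List.length hr
          simp at this
          simp only [List.length_cons] at h
          omega
        rw [show List.drop (List.length ['~', '~']) (['~', '~'] ++ r) = r by simp]
        rw [ih _ _ hlen]
        simp [rep]
      · rw [if_neg hp]
        simp only [List.length_cons] at h
        rw [ih _ _ (by omega)]
        have hne : ¬ (c = '~' ∧ t.head? = some '~') := by
          intro ⟨h1, h2⟩
          apply hp
          cases t with
          | nil => simp at h2
          | cons c2 t2 =>
            simp at h2
            simp [h1, h2, List.isPrefixOf]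
        have : rep (c :: t) = c :: rep t := by
          cases t with
          | nil => simp [rep]
          | cons c2 t2 =>
            simp only [rep]
            rw [if_neg]
            intro ⟨h1, h2⟩
            exact hne ⟨h1, by simp [h2]⟩
        rw [this]
        simp

theorem replace_eq_rep (l : List Char) : PySem.Chars.replace l ['~', '~'] [] = rep l := by
  rw [PySem.Chars.replace]
  simp only [List.isEmpty_cons, Bool.false_eq_true, if_false]
  exact go_spec l.length l [] le_rfl

theorem replace_toList (e : String) :
    (PySem.Str.replace e "~~" "").toList = rep e.toList := by
  rw [PySem.Str.toList_replace]
  rw [show ("~~" : String).toList = ['~', '~'] from rfl, show ("" : String).toList = [] from rfl]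
  exact replace_eq_rep e.toList

theorem dnGo_eq : ∀ (fuel : Nat) (e : String), e.toList.length ≤ fuel →
    doubleNegationGo fuel e = String.ofList (rep e.toList) := by
  intro fuel
  induction fuel with
  | zero =>
    intro e h
    have hnil : e.toList = [] := List.eq_nil_of_length_eq_zero (Nat.le_zero.mp h)
    rw [doubleNegationGo, hnil]
    rw [show rep [] = [] from rfl, ← hnil, String.ofList_toList]
  | succ n ih =>
    intro e h
    rw [doubleNegationGo]
    by_cases hin : PySem.Str.isIn "~~" e = true
    · rw [if_pos hin]
      have hdd : hasDD e.toList = true := by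
        rw [hasDD_iff_infix]
        rw [PySem.Str.isIn_iff_infix] at hin
        exact hin
      have hlt : (PySem.Str.replace e "~~" "").toList.length ≤ n := by
        rw [replace_toList]
        have := rep_length_lt e.toList hdd
        omega
      rw [ih _ hlt, replace_toList]
      rw [rep_id_of_not _ (hasDD_rep _)]
    · rw [if_neg hin]
      have heq : rep e.toList = e.toList := by
        apply rep_id_of_not
        rw [← Bool.not_eq_true, hasDD_iff_infix]
        rw [show (['~', '~'] : List Char) = ("~~" : String).toList from rfl]
        rw [← PySem.Str.isIn_iff_infix]
        simpa using hin
      rw [heq, String.ofList_toList]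

theorem dn_eq (e : String) : doubleNegation e = String.ofList (rep e.toList) := by
  rw [doubleNegation]
  exact dnGo_eq e.toList.length e le_rfl

def expandC (c : Char) : List Char := if PySem.Chars.isalpha c then ['~', c] else [c]

theorem phaseA_take : ∀ (l : List Char) (k : Nat), k ≤ l.length →
    (PySem.List.pyRange 0 (k : Int) 1).foldl (fun s i =>
      let c := PySem.List.pyGetD l i ' '
      if PySem.Chars.isalpha c then
        if 0 < i then
          if pyIntEqStr (i - 1) "~" then s ++ [c] else s ++ ['~', c]
        else if i = 0 then s ++ ['~', c]
        else s
      else s ++ [c]) [] = List.flatMap expandC (l.take k) := by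
  intro l k
  induction k with
  | zero => intro _; simp [PySem.List.pyRange]
  | succ n ih =>
    intro hk
    rw [show ((n + 1 : Nat) : Int) = (n : Int) + 1 by push_cast; ring]
    rw [PySem.List.pyRange_one_succ_right (by positivity)]
    rw [List.foldl_append]
    rw [ih (by omega)]
    simp only [List.foldl_cons, List.foldl_nil]
    rw [PySem.List.pyGetD_natCast]
    have hget : l.getD n ' ' = l[n]'(by omega) := List.getD_eq_getElem l ' ' (by omega)
    have htake : l.take (n + 1) = l.take n ++ [l[n]'(by omega)] := by
      rw [List.take_add_one]
      simp [List.getElem?_eq_getElem (by omega : n < l.length)]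
    rw [htake, List.flatMap_append]
    simp only [List.flatMap_cons, List.flatMap_nil, List.append_nil]
    rw [hget]
    by_cases ha : PySem.Chars.isalpha (l[n]'(by omega))
    · rw [if_pos ha]
      by_cases hn : 0 < (n : Int)
      · rw [if_pos hn]
        simp [pyIntEqStr, expandC, ha]
      · rw [if_neg hn, if_pos (by omega)]
        simp [expandC, ha]
    · rw [if_neg ha]
      simp [expandC, ha]

theorem phaseA (l : List Char) :
    (PySem.List.pyRange 0 (l.length : Int) 1).foldl (fun s i =>
      let c := PySem.List.pyGetD l i ' '
      if PySem.Chars.isalpha c then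
        if 0 < i then
          if pyIntEqStr (i - 1) "~" then s ++ [c] else s ++ ['~', c]
        else if i = 0 then s ++ ['~', c]
        else s
      else s ++ [c]) [] = List.flatMap expandC l := by
  have := phaseA_take l l.length le_rfl
  simpa using this

def stackStep (st : List Char) (c : Char) : List Char :=
  if c = '~' then cancelPush st else st ++ [c]

def tilde (p : Bool) : List Char := if p then ['~'] else []

def repStep (s : List Char × Bool) (c : Char) : List Char × Bool :=
  if c = '~' then (s.1, !s.2) else (s.1 ++ tilde s.2 ++ [c], false)

theorem stack_eq_repFold : ∀ (l o : List Char) (p : Bool), o.getLast? ≠ some '~' →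
    l.foldl stackStep (o ++ tilde p) =
      (l.foldl repStep (o, p)).1 ++ tilde (l.foldl repStep (o, p)).2 := by
  intro l
  induction l with
  | nil => intro o p _; simp
  | cons c t ih =>
    intro o p ho
    simp only [List.foldl_cons]
    by_cases hc : c = '~'
    · subst hc
      cases p with
      | true =>
        have h1 : stackStep (o ++ tilde true) '~' = o ++ tilde false := by
          simp [stackStep, cancelPush, tilde, List.getLast?_append]
        have h2 : repStep (o, true) '~' = (o, false) := by simp [repStep]
        rw [h1, h2]; exact ih o false ho
      | false =>
        have h1 : stackStep (o ++ tilde false) '~' = o ++ tilde true := by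
          simp [stackStep, cancelPush, tilde, ho]
        have h2 : repStep (o, false) '~' = (o, true) := by simp [repStep]
        rw [h1, h2]; exact ih o true ho
    · have h1 : stackStep (o ++ tilde p) c = (o ++ tilde p ++ [c]) ++ tilde false := by
        simp [stackStep, hc, tilde]
      have h2 : repStep (o, p) c = (o ++ tilde p ++ [c], false) := by simp [repStep, hc]
      rw [h1, h2]
      exact ih _ false (by simp [List.getLast?_append, hc])

theorem repFold_eq_rep : ∀ (l o : List Char) (p : Bool), o.getLast? ≠ some '~' →
    (l.foldl repStep (o, p)).1 ++ tilde (l.foldl repStep (o, p)).2 = o ++ rep (tilde p ++ l) := by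
  intro l
  induction l with
  | nil =>
    intro o p _
    cases p <;> simp [tilde, rep]
  | cons c t ih =>
    intro o p ho
    simp only [List.foldl_cons]
    by_cases hc : c = '~'
    · subst hc
      rw [show repStep (o, p) '~' = (o, !p) by simp [repStep]]
      rw [ih o (!p) ho]
      congr 1
      cases p with
      | true => simp [tilde, rep]
      | false => simp [tilde]
    · rw [show repStep (o, p) c = (o ++ tilde p ++ [c], false) by simp [repStep, hc]]
      rw [ih _ false (by simp [List.getLast?_append, hc])]
      cases p with
      | true =>
        have hr : rep ('~' :: c :: t) = '~' :: c :: rep t := by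
          simp only [rep]
          rw [if_neg (fun h => hc h.2), rep_cons_ne c t hc]
        simp [tilde, hr]
      | false =>
        simp [tilde, rep_cons_ne c t hc]

theorem alt_step_expand (st : List Char) (ch : Char) :
    (if PySem.Chars.isalpha ch then cancelPush st ++ [ch]
     else if ch = '~' then cancelPush st
     else st ++ [ch]) = (expandC ch).foldl stackStep st := by
  have htilde : PySem.Chars.isalpha '~' = false := by decide
  by_cases ha : PySem.Chars.isalpha ch
  · have hne : ch ≠ '~' := by
      intro h; subst h; rw [htilde] at ha; exact Bool.false_ne_true ha
    simp [expandC, ha, stackStep, hne]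
  · by_cases hc : ch = '~'
    · subst hc
      simp [expandC, htilde, stackStep]
    · simp [expandC, ha, stackStep, hc]

theorem alt_eq_rep (l : List Char) :
    l.foldl (fun st ch =>
      if PySem.Chars.isalpha ch then cancelPush st ++ [ch]
      else if ch = '~' then cancelPush st
      else st ++ [ch]) [] = rep (List.flatMap expandC l) := by
  have key : ∀ (l : List Char) (st : List Char),
      l.foldl (fun st ch =>
        if PySem.Chars.isalpha ch then cancelPush st ++ [ch]
        else if ch = '~' then cancelPush st
        else st ++ [ch]) st = (List.flatMap expandC l).foldl stackStep st := by
    intro l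
    induction l with
    | nil => intro st; simp
    | cons c t ih =>
      intro st
      simp only [List.foldl_cons, List.flatMap_cons, List.foldl_append]
      rw [alt_step_expand, ih]
  rw [key]
  have h1 := stack_eq_repFold (List.flatMap expandC l) [] false (by simp)
  have h2 := repFold_eq_rep (List.flatMap expandC l) [] false (by simp)
  simp only [tilde, Bool.false_eq_true, if_false, List.nil_append, List.append_nil] at h1 h2
  rw [h1, h2]

-- ===== VERDICT (by name: the statement is the Claim_ definition above) =====
theorem pmosEqCreator_spec : Claim_equal_pmosEqCreator := by
  intro eq _
  unfold Spec_pmosEqCreator pmosEqCreator pmosEqCreator_alt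
  simp only [PySem.List.foldl_append_singleton, List.nil_append]
  rw [phaseA, dn_eq, alt_eq_rep]
  congr 1
  simp
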